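-- pv_equiv track=rewrite | github.com/pypi-data/pypi-mirror-145 | packages/liyi-cute/liyi_cute-0.0.1-py3-none-any.whl/liyi_cute/processor/preprocess.py | cut_sentences_v1
-- ===== SOURCE A (Python) =====
-- from typing import Tuple, List, Dict, Text
--
-- def cut_sentences_v1(sent_tupe:Tuple,  punctuation_special_char={".", ";"})->List[Tuple]:
--     """
--     [(0, "1111"), (65, "222")], tupe第一位是原文的开始位置，第二位是原文截断后的位置
--     """
--     init_start = sent_tupe[0]
--     sent = sent_tupe[1]
--     sents = []
--     string = ""
--     start = 0
--     for index, char in enumerate(sent):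
--         if char==" " and index-1>0 and (sent[index-1] in punctuation_special_char):
--             string +=sent[index]
--             sents.append((init_start+start, string))
--             string = ""
--             start = index+1
--         else:
--             string += sent[index]
--     if string:
--         sents.append((init_start+start, string))
--     return sents
-- ===== SOURCE B (Python) =====
-- def cut_sentences_v1(sent_tupe, punctuation_special_char={".", ";"}):
--     init_start, sent = sent_tupe[0], sent_tupe[1]
--     n = len(sent)
--     cuts = [i for i in range(2, n)
--             if sent[i] == " " and sent[i - 1] in punctuation_special_char]
--     sents = []
--     start = 0
--     for c in cuts:
--         sents.append((init_start + start, sent[start:c + 1]))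
--         start = c + 1
--     if start < n:
--         sents.append((init_start + start, sent[start:]))
--     return sents
-- ===== Notes on version B (the rewrite author's own statement) =====
-- stated objective: alternative
-- what changed: B first collects all cut positions (space preceded by a punctuation char, index>1) in one comprehension, then builds the segments by slicing the string between consecutive cuts, instead of A's char-by-char accumulator that grows a string and flushes it at each cut.
import Mathlib
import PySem

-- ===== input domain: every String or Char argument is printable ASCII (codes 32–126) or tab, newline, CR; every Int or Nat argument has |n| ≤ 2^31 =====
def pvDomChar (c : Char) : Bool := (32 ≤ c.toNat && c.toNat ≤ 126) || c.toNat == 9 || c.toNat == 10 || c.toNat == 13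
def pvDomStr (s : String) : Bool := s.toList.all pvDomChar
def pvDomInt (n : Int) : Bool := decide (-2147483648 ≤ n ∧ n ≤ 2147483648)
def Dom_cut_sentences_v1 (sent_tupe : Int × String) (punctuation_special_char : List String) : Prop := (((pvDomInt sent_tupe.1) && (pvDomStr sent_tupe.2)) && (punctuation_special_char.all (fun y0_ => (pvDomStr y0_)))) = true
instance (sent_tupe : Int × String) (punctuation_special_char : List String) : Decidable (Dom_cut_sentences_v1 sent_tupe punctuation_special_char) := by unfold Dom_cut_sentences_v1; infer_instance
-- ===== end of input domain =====

-- B collects all cut positions first and then slices the string between consecutive cuts,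
-- instead of A's char-by-char accumulator; an alternative decomposition of the same cost.

-- ===== PORT A =====
def cut_sentences_v1 (sent_tupe : Int × String) (punctuation_special_char : List String) : List (Int × String) :=
  let init_start := sent_tupe.1
  let sent := sent_tupe.2.toList
  let res := (PySem.List.enumerate sent 0).foldl
    (fun (st : List (Int × String) × List Char × Int) p =>
      let sents := st.1
      let string := st.2.1
      let start := st.2.2
      let index := p.1
      let char := p.2
      if (char == ' ') && decide (index - 1 > 0) &&
         ((PySem.List.pyGet? sent (index - 1)).map
           (fun c => punctuation_special_char.contains (String.ofList [c]))).getD false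
      then (sents ++ [(init_start + start, String.ofList (string ++ [char]))], [], index + 1)
      else (sents, string ++ [char], start))
    ([], [], 0)
  if res.2.1 = [] then res.1 else res.1 ++ [(init_start + res.2.2, String.ofList res.2.1)]

-- ===== PORT B =====
def cut_sentences_v1_alt (sent_tupe : Int × String) (punctuation_special_char : List String) : List (Int × String) :=
  let init_start := sent_tupe.1
  let sent := sent_tupe.2.toList
  let n : Int := sent.length
  let cuts := (PySem.List.pyRange 2 n 1).filter (fun i =>
      (PySem.List.pyGet? sent i == some ' ') &&
      ((PySem.List.pyGet? sent (i - 1)).map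
        (fun c => punctuation_special_char.contains (String.ofList [c]))).getD false)
  let res := cuts.foldl
    (fun (st : List (Int × String) × Int) c =>
      (st.1 ++ [(init_start + st.2, String.ofList (PySem.List.slice sent (some st.2) (some (c + 1))))], c + 1))
    ([], 0)
  if res.2 < n then res.1 ++ [(init_start + res.2, String.ofList (PySem.List.slice sent (some res.2) none))]
  else res.1

-- ===== PRECONDITION & SPEC =====
def Spec_cut_sentences_v1 (sent_tupe : Int × String) (punctuation_special_char : List String) (out : List (Int × String)) : Prop := out = cut_sentences_v1_alt sent_tupe punctuation_special_char
instance (sent_tupe : Int × String) (punctuation_special_char : List String) (out : List (Int × String)) : Decidable (Spec_cut_sentences_v1 sent_tupe punctuation_special_char out) := by unfold Spec_cut_sentences_v1; infer_instance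

-- ===== CLAIM (what is proved, stated in full; the proofs are below) =====
def Claim_equal_cut_sentences_v1 : Prop := ∀ (sent_tupe : Int × String) (punctuation_special_char : List String), Dom_cut_sentences_v1 sent_tupe punctuation_special_char → Spec_cut_sentences_v1 sent_tupe punctuation_special_char (cut_sentences_v1 sent_tupe punctuation_special_char)

-- ===== LEMMAS AND PROOFS =====

-- the cut condition at position i (an Int index), shared by the two proof-side characterisations
def pvCond (sent : List Char) (punct : List String) (i : Int) : Bool :=
  (PySem.List.pyGet? sent i == some ' ') && decide (i - 1 > 0) &&
  ((PySem.List.pyGet? sent (i - 1)).map (fun c => punct.contains (String.ofList [c]))).getD false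

-- common recursive description of the segment list: scan positions k, k+1, … with pending segment start
def pvGo (init : Int) (sent : List Char) (punct : List String) (start k : Nat) : List (Int × String) :=
  if h : k < sent.length then
    if pvCond sent punct k then
      (init + start, String.ofList ((sent.drop start).take (k + 1 - start))) :: pvGo init sent punct (k + 1) (k + 1)
    else pvGo init sent punct start (k + 1)
  else if start < sent.length then [(init + (start : Int), String.ofList (sent.drop start))] else []
termination_by sent.length - k

-- the trailing flush of port A / port B, named so the loop lemmas can be stated without `let`
def pvFinA (init : Int) (res : List (Int × String) × List Char × Int) : List (Int × String) :=
  if res.2.1 = [] then res.1 else res.1 ++ [(init + res.2.2, String.ofList res.2.1)]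

def pvFinB (init : Int) (n : Int) (sent : List Char) (res : List (Int × String) × Int) : List (Int × String) :=
  if res.2 < n then res.1 ++ [(init + res.2, String.ofList (PySem.List.slice sent (some res.2) none))] else res.1

lemma pvCond_at (sent : List Char) (punct : List String) (k : Nat) (hk : k < sent.length) :
    ((sent[k] == ' ') && decide ((k : Int) - 1 > 0) &&
      ((PySem.List.pyGet? sent ((k : Int) - 1)).map
        (fun c => punct.contains (String.ofList [c]))).getD false)
    = pvCond sent punct (k : Int) := by
  have h1 : PySem.List.pyGet? sent (k : Int) = some sent[k] := by
    rw [PySem.List.pyGet?_natCast]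
    exact List.getElem?_eq_getElem hk
  simp [pvCond, h1]

lemma pvSeg_step (sent : List Char) (start k : Nat) (hsk : start ≤ k) (hk : k < sent.length) :
    (sent.drop start).take (k - start) ++ [sent[k]] = (sent.drop start).take (k + 1 - start) := by
  have h1 : (sent.drop start)[k - start]? = some sent[k] := by
    rw [List.getElem?_drop, show start + (k - start) = k from by omega]
    exact List.getElem?_eq_getElem hk
  rw [show k + 1 - start = (k - start) + 1 from by omega, List.take_add_one, h1]
  simp

lemma pvA_go (init : Int) (sent : List Char) (punct : List String) :
    ∀ (fuel k start : Nat) (sents : List (Int × String)),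
      sent.length - k = fuel → start ≤ k → k ≤ sent.length →
      pvFinA init ((PySem.List.enumerate (sent.drop k) (k : Int)).foldl
        (fun (st : List (Int × String) × List Char × Int) p =>
          if (p.2 == ' ') && decide (p.1 - 1 > 0) &&
             ((PySem.List.pyGet? sent (p.1 - 1)).map
               (fun c => punct.contains (String.ofList [c]))).getD false
          then (st.1 ++ [(init + st.2.2, String.ofList (st.2.1 ++ [p.2]))], [], p.1 + 1)
          else (st.1, st.2.1 ++ [p.2], st.2.2))
        (sents, (sent.drop start).take (k - start), (start : Int)))
      = sents ++ pvGo init sent punct start k := by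
  intro fuel
  induction fuel with
  | zero =>
    intro k start sents hf hsk hkn
    have hk : k = sent.length := by omega
    subst hk
    have hstr : (sent.drop start).take (sent.length - start) = sent.drop start :=
      List.take_of_length_le (by simp)
    rw [pvGo]
    by_cases hs : start < sent.length
    · have hne : sent.drop start ≠ [] := by
        rw [Ne, List.drop_eq_nil_iff]; omega
      simp [pvFinA, hstr, hs, hne]
    · have hnil : sent.drop start = [] := List.drop_eq_nil_iff.mpr (by omega)
      simp [pvFinA, hs, hnil]
  | succ fuel ih =>
    intro k start sents hf hsk hkn
    have hk : k < sent.length := by omega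
    rw [List.drop_eq_getElem_cons hk, PySem.List.enumerate_cons, List.foldl_cons]
    simp only [pvCond_at sent punct k hk]
    by_cases hc : pvCond sent punct (k : Int) = true
    · rw [if_pos hc, pvSeg_step sent start k hsk hk,
        show (k : Int) + 1 = ((k + 1 : Nat) : Int) from by push_cast; ring]
      have hih := ih (k + 1) (k + 1)
        (sents ++ [(init + (start : Int), String.ofList ((sent.drop start).take (k + 1 - start)))])
        (by omega) le_rfl (by omega)
      simp only [Nat.sub_self, List.take_zero] at hih
      rw [hih]
      conv_rhs => rw [pvGo]
      simp [hk, hc]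
    · rw [if_neg (by simp [hc]), pvSeg_step sent start k hsk hk,
        show (k : Int) + 1 = ((k + 1 : Nat) : Int) from by push_cast; ring]
      rw [ih (k + 1) start sents (by omega) (by omega) (by omega)]
      conv_rhs => rw [pvGo]
      simp [hk, hc]

lemma pvB_go (init : Int) (sent : List Char) (punct : List String) :
    ∀ (fuel k start : Nat) (sents : List (Int × String)),
      sent.length - k = fuel → start ≤ k → k ≤ sent.length →
      pvFinB init (sent.length : Int) sent
        (((PySem.List.pyRange (k : Int) (sent.length : Int) 1).filter (pvCond sent punct)).foldl
          (fun (st : List (Int × String) × Int) c =>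
            (st.1 ++ [(init + st.2, String.ofList (PySem.List.slice sent (some st.2) (some (c + 1))))], c + 1))
          (sents, (start : Int)))
      = sents ++ pvGo init sent punct start k := by
  intro fuel
  induction fuel with
  | zero =>
    intro k start sents hf hsk hkn
    have hk : k = sent.length := by omega
    subst hk
    rw [PySem.List.pyRange_one_eq_nil le_rfl]
    rw [pvGo]
    simp only [List.filter_nil, List.foldl_nil]
    by_cases hs : start < sent.length
    · have hs' : (start : Int) < (sent.length : Int) := by exact_mod_cast hs
      rw [pvFinB, if_pos hs', PySem.List.slice_from_natCast]
      simp [hs]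
    · have hs' : ¬ (start : Int) < (sent.length : Int) := by
        simp only [not_lt] at hs ⊢; exact_mod_cast hs
      rw [pvFinB, if_neg hs']
      simp [hs]
  | succ fuel ih =>
    intro k start sents hf hsk hkn
    have hk : k < sent.length := by omega
    have hk' : (k : Int) < (sent.length : Int) := by exact_mod_cast hk
    rw [PySem.List.pyRange_one_cons hk', List.filter_cons]
    by_cases hc : pvCond sent punct (k : Int) = true
    · rw [if_pos hc, List.foldl_cons,
        show (k : Int) + 1 = ((k + 1 : Nat) : Int) from by push_cast; ring,
        PySem.List.slice_natCast]
      rw [ih (k + 1) (k + 1)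
        (sents ++ [(init + (start : Int), String.ofList ((sent.drop start).take (k + 1 - start)))])
        (by omega) le_rfl (by omega)]
      conv_rhs => rw [pvGo]
      simp [hk, hc]
    · rw [if_neg (by simp [hc]),
        show (k : Int) + 1 = ((k + 1 : Nat) : Int) from by push_cast; ring]
      rw [ih (k + 1) start sents (by omega) (by omega) (by omega)]
      conv_rhs => rw [pvGo]
      simp [hk, hc]

lemma pvB_filter (sent : List Char) (punct : List String) :
    (PySem.List.pyRange 2 (sent.length : Int) 1).filter (fun i =>
        (PySem.List.pyGet? sent i == some ' ') &&
        ((PySem.List.pyGet? sent (i - 1)).map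
          (fun c => punct.contains (String.ofList [c]))).getD false)
    = (PySem.List.pyRange 0 (sent.length : Int) 1).filter (pvCond sent punct) := by
  have h1 : (PySem.List.pyRange 2 (sent.length : Int) 1).filter (fun i =>
        (PySem.List.pyGet? sent i == some ' ') &&
        ((PySem.List.pyGet? sent (i - 1)).map
          (fun c => punct.contains (String.ofList [c]))).getD false)
      = (PySem.List.pyRange 2 (sent.length : Int) 1).filter (pvCond sent punct) := by
    apply List.filter_congr
    intro i hi
    have h2 : (2 : Int) ≤ i := (PySem.List.mem_pyRange_one.mp hi).1
    have hd : (1 : Int) < i := by omega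
    simp [pvCond, hd]
  rw [h1]
  by_cases hn : (2 : Int) ≤ (sent.length : Int)
  · rw [PySem.List.pyRange_one_append 0 2 (sent.length : Int) (by omega) hn,
      List.filter_append]
    have h01 : PySem.List.pyRange 0 2 1 = [0, 1] := by decide
    rw [h01]
    have hc0 : pvCond sent punct 0 = false := by simp [pvCond]
    have hc1 : pvCond sent punct 1 = false := by simp [pvCond]
    simp [hc0, hc1]
  · rw [PySem.List.pyRange_one_eq_nil (by omega)]
    symm
    apply List.filter_eq_nil_iff.mpr
    intro i hi
    have h2 := PySem.List.mem_pyRange_one.mp hi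
    have hd : ¬ (1 : Int) < i := by omega
    simp [pvCond, hd]

-- ===== VERDICT (by name: the statement is the Claim_ definition above) =====
theorem cut_sentences_v1_spec : Claim_equal_cut_sentences_v1 := by
  intro st punct _
  obtain ⟨init, s⟩ := st
  unfold Spec_cut_sentences_v1
  have hA := pvA_go init s.toList punct s.toList.length 0 0 [] (by omega) le_rfl (by omega)
  have hB := pvB_go init s.toList punct s.toList.length 0 0 [] (by omega) le_rfl (by omega)
  simp only [Nat.sub_zero, List.drop_zero, List.take_zero, Nat.cast_zero, List.nil_append] at hA hB
  rw [← pvB_filter s.toList punct] at hB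
  exact hA.trans hB.symm
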